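-- pv_equiv track=rewrite | github.com/drmysore/blackwell-diffusion-rtx6000-5090-i2v | fx/src/s4/models/wan_22/wan_serialization.py | _normalize_parameter_name
-- ===== SOURCE A (Python) =====
-- def _normalize_parameter_name(name: str) -> str:
--     """
--     Normalize parameter names for ComfyUI compatibility.
--
--     ComfyUI expects certain naming conventions for attention weights.
--     """
--
--     # Map our names to ComfyUI expected names
--     replacements = {
--         ".to_qkv.": ".to_qkv.",  # Keep as is
--         ".to_kv.": ".to_kv.",  # Keep as is
--         ".to_q.": ".to_q.",  # Keep as is
--         ".to_out.0.": ".to_out.0.",  # Linear layer in output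
--         ".self_attn.": ".attn1.",  # Self-attention
--         ".cross_attn.": ".attn2.",  # Cross-attention
--     }
--
--     for old, new in replacements.items():
--         name = name.replace(old, new)
--
--     return name
-- ===== SOURCE B (Python) =====
-- import re
--
-- _PATTERN = re.compile(r"\.self_attn\.|\.cross_attn\.")
-- _MAPPING = {".self_attn.": ".attn1.", ".cross_attn.": ".attn2."}
--
--
-- def _normalize_parameter_name(name: str) -> str:
--     """Normalize parameter names for ComfyUI compatibility (single regex pass)."""
--     return _PATTERN.sub(lambda m: _MAPPING[m.group(0)], name)
-- ===== Notes on version B (the rewrite author's own statement) =====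
-- stated objective: idiomatic
-- what changed: Replaced A's six full-string .replace passes (four of them identity no-ops) by a single left-to-right regex-alternation pass that dispatches each match through a two-entry mapping.
-- outside the precondition, e.g. on _normalize_parameter_name('.self_attn.cross_attn.'): A returns '.attn1.attn2.', B returns '.attn1.cross_attn.'; on _normalize_parameter_name('.cross_attn.self_attn.'): A returns '.attn2.attn1.', B returns '.attn2.self_attn.'
import Mathlib
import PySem

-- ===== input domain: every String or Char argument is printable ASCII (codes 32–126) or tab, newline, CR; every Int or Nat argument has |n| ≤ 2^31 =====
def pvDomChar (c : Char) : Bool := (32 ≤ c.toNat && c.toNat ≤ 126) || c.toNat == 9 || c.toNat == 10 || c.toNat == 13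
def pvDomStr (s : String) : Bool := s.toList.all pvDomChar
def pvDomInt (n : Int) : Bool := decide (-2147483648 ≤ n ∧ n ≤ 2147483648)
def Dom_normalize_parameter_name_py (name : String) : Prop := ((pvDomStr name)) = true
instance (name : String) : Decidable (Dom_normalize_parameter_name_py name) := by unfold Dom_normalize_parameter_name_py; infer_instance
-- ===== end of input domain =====

-- B replaces A's six sequential full-string .replace passes (four of them identity
-- entries) by a single left-to-right scan that dispatches each match of the two
-- non-identity patterns through a mapping (idiomatic single pass).

-- ===== PORT A =====
-- literal transliteration of A: six sequential str.replace passes, in source order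
def normalize_parameter_name_py (name : String) : String :=
  let name := PySem.Str.replace name ".to_qkv." ".to_qkv."
  let name := PySem.Str.replace name ".to_kv." ".to_kv."
  let name := PySem.Str.replace name ".to_q." ".to_q."
  let name := PySem.Str.replace name ".to_out.0." ".to_out.0."
  let name := PySem.Str.replace name ".self_attn." ".attn1."
  let name := PySem.Str.replace name ".cross_attn." ".attn2."
  name

-- ===== PORT B =====
-- Source B is re.sub(r"\.self_attn\.|\.cross_attn\.", lambda m: mapping[m.group(0)], name):
-- one left-to-right scan that at each position tries the alternation branches in order;
-- on a match it emits the mapped replacement and resumes after the matched text.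
-- Ported by hand (no regex engine in Lean); exact for these two literal alternatives.
def nscanL : List Char → List Char
  | [] => []
  | c :: t =>
    if (".self_attn.".toList).isPrefixOf (c :: t) then
      ".attn1.".toList ++ nscanL (t.drop 10)
    else if (".cross_attn.".toList).isPrefixOf (c :: t) then
      ".attn2.".toList ++ nscanL (t.drop 11)
    else c :: nscanL t
  termination_by l => l.length
  decreasing_by
    · simpa using Nat.lt_succ_of_le (List.length_drop_le t 10)
    · simpa using Nat.lt_succ_of_le (List.length_drop_le t 11)
    · simp

def normalize_parameter_name_py_alt (name : String) : String :=
  String.ofList (nscanL name.toList)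

-- ===== PRECONDITION & SPEC =====
-- Pre_ excludes names in which the two attention markers overlap sharing a dot
-- (substring ".self_attn.cross_attn." or ".cross_attn.self_attn."): there A's second
-- replace pass re-matches across text produced by the first pass, an order-of-passes
-- corner no caller specifies, and B does the natural single-pass thing.
def Pre_normalize_parameter_name_py (name : String) : Prop :=
  PySem.Str.isIn ".self_attn.cross_attn." name = false ∧
  PySem.Str.isIn ".cross_attn.self_attn." name = false
instance (name : String) : Decidable (Pre_normalize_parameter_name_py name) := by
  unfold Pre_normalize_parameter_name_py; infer_instance

def pvWitness_normalize_parameter_name_py : String := "blocks.0.self_attn.to_q.weight"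

def Spec_normalize_parameter_name_py (name : String) (out : String) : Prop :=
  out = normalize_parameter_name_py_alt name
instance (name : String) (out : String) : Decidable (Spec_normalize_parameter_name_py name out) := by
  unfold Spec_normalize_parameter_name_py; infer_instance

-- ===== CLAIM (what is proved, stated in full; the proofs are below) =====
def Claim_equal_normalize_parameter_name_py : Prop :=
  ∀ (name : String), Dom_normalize_parameter_name_py name →
    Pre_normalize_parameter_name_py name →
    Spec_normalize_parameter_name_py name (normalize_parameter_name_py name)

-- ===== LEMMAS AND PROOFS =====

-- structural version of CPython's str.replace left-to-right scan (exact for pat ≠ [])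
def replGen (pat rep : List Char) : List Char → List Char
  | [] => []
  | c :: t =>
    if pat.isPrefixOf (c :: t) then rep ++ replGen pat rep (t.drop (pat.length - 1))
    else c :: replGen pat rep t
  termination_by l => l.length
  decreasing_by
    · simpa using Nat.lt_succ_of_le (List.length_drop_le t (pat.length - 1))
    · simp

theorem replGen_go_eq (old new : List Char) (hold : old ≠ []) :
    ∀ (fuel : Nat) (l acc : List Char), l.length ≤ fuel →
      PySem.Chars.replace.go old new fuel l acc = acc.reverse ++ replGen old new l := by
  intro fuel
  induction fuel with
  | zero =>
    intro l acc h
    have hl : l = [] := by cases l <;> simp_all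
    subst hl
    simp [PySem.Chars.replace.go, replGen]
  | succ n ih =>
    intro l acc h
    cases l with
    | nil => simp [PySem.Chars.replace.go, replGen]
    | cons c t =>
      rw [show PySem.Chars.replace.go old new (n+1) (c::t) acc =
          if old.isPrefixOf (c::t) then
            PySem.Chars.replace.go old new n ((c::t).drop old.length) (new.reverse ++ acc)
          else PySem.Chars.replace.go old new n t (c :: acc) from rfl]
      by_cases hp : old.isPrefixOf (c::t)
      · simp only [hp, if_pos]
        have hlen : ((c::t).drop old.length).length ≤ n := by
          have : 1 ≤ old.length := by cases old <;> simp_all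
          simp at h ⊢
          omega
        rw [ih _ _ hlen]
        have : (c::t).drop old.length = t.drop (old.length - 1) := by
          cases old with
          | nil => exact absurd rfl hold
          | cons o os => simp
        rw [replGen]
        simp [hp, this]
      · simp only [hp, Bool.false_eq_true, if_false]
        have ht : t.length ≤ n := by simp at h; omega
        rw [ih t (c :: acc) ht, replGen]
        simp [hp]

theorem replace_eq_replGen (l old new : List Char) (hold : old ≠ []) :
    PySem.Chars.replace l old new = replGen old new l := by
  rw [PySem.Chars.replace]
  have : old.isEmpty = false := by cases old <;> simp_all
  rw [this]
  simp only [Bool.false_eq_true, if_false]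
  simpa using replGen_go_eq old new hold l.length l [] le_rfl

theorem replGen_id (p : List Char) (hp : p ≠ []) : ∀ l, replGen p p l = l := by
  intro l
  induction hn : l.length using Nat.strong_induction_on generalizing l with
  | _ n ih =>
  subst hn
  cases l with
  | nil => rw [replGen]
  | cons c t =>
    rw [replGen]
    by_cases hpre : p.isPrefixOf (c :: t)
    · simp only [hpre, if_pos]
      obtain ⟨r, hr⟩ := List.isPrefixOf_iff_prefix.mp hpre
      have hdrop : t.drop (p.length - 1) = r := by
        have : (c :: t).drop p.length = r := by rw [← hr]; simp
        cases p with
        | nil => exact absurd rfl hp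
        | cons a as => simpa using this
      rw [hdrop, ih r.length (by rw [← hr]; cases p with
        | nil => exact absurd rfl hp
        | cons a as => simp) r rfl]
      exact hr
    · simp only [hpre, Bool.false_eq_true, if_false]
      rw [ih t.length (by simp) t rfl]

theorem noMatchCons (pat rep : List Char) (c : Char) (X : List Char)
    (h : ¬ pat.isPrefixOf (c :: X) = true) :
    replGen pat rep (c :: X) = c :: replGen pat rep X := by
  rw [replGen]
  simp only [h, Bool.false_eq_true, if_false]

-- a letters-then-dot pattern found as a prefix of pass-1 output forces the original text
theorem scan_letters (w : List Char) (hw : ∀ ch ∈ w, ch ≠ '.') :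
    ∀ t, (w ++ ['.']).isPrefixOf (replGen ".self_attn.".toList ".attn1.".toList t) = true →
      ∃ t', t = w ++ t' ∧
        (t'.head? = some '.' ∨ (".self_attn.".toList).isPrefixOf t' = true) := by
  induction w with
  | nil =>
    intro t h
    cases t with
    | nil => rw [replGen] at h; simp [List.isPrefixOf] at h
    | cons c t2 =>
      rw [replGen] at h
      by_cases hpre : (".self_attn.".toList).isPrefixOf (c :: t2) = true
      · exact ⟨c :: t2, by simp, Or.inr hpre⟩
      · simp only [hpre, Bool.false_eq_true, if_false] at h
        simp [List.isPrefixOf] at h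
        exact ⟨c :: t2, by simp, Or.inl (by simp [← h])⟩
  | cons a w' ih =>
    intro t h
    cases t with
    | nil => rw [replGen] at h; simp [List.isPrefixOf] at h
    | cons c t2 =>
      rw [replGen] at h
      by_cases hpre : (".self_attn.".toList).isPrefixOf (c :: t2) = true
      · simp only [hpre, if_pos] at h
        simp [List.isPrefixOf] at h
        exact absurd h.1 (hw a (by simp))
      · simp only [hpre, Bool.false_eq_true, if_false] at h
        simp only [List.cons_append, List.isPrefixOf] at h
        rw [Bool.and_eq_true] at h
        have hac : a = c := eq_of_beq h.1
        have h2 := h.2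
        obtain ⟨t', ht', hcase⟩ := ih (fun ch hch => hw ch (List.mem_cons_of_mem a hch)) t2 h2
        exact ⟨t', by rw [ht', hac]; simp, hcase⟩

theorem repl2_a1 (X : List Char) (hX : ¬ ("cross_attn.".toList).isPrefixOf X = true) :
    replGen ".cross_attn.".toList ".attn2.".toList (".attn1.".toList ++ X)
      = ".attn1.".toList ++ replGen ".cross_attn.".toList ".attn2.".toList X := by
  show replGen _ _ ('.'::'a'::'t'::'t'::'n'::'1'::'.'::X) = _
  rw [noMatchCons _ _ _ _ (by simp [List.isPrefixOf])]
  rw [noMatchCons _ _ _ _ (by simp [List.isPrefixOf])]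
  rw [noMatchCons _ _ _ _ (by simp [List.isPrefixOf])]
  rw [noMatchCons _ _ _ _ (by simp [List.isPrefixOf])]
  rw [noMatchCons _ _ _ _ (by simp [List.isPrefixOf])]
  rw [noMatchCons _ _ _ _ (by simp [List.isPrefixOf])]
  rw [noMatchCons _ _ _ _ (by simpa [List.isPrefixOf] using hX)]
  rfl

theorem repl1_ca (r : List Char) (hr : ¬ ("self_attn.".toList).isPrefixOf r = true) :
    replGen ".self_attn.".toList ".attn1.".toList (".cross_attn.".toList ++ r)
      = ".cross_attn.".toList ++ replGen ".self_attn.".toList ".attn1.".toList r := by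
  show replGen _ _ ('.'::'c'::'r'::'o'::'s'::'s'::'_'::'a'::'t'::'t'::'n'::'.'::r) = _
  rw [noMatchCons _ _ _ _ (by simp [List.isPrefixOf])]
  rw [noMatchCons _ _ _ _ (by simp [List.isPrefixOf])]
  rw [noMatchCons _ _ _ _ (by simp [List.isPrefixOf])]
  rw [noMatchCons _ _ _ _ (by simp [List.isPrefixOf])]
  rw [noMatchCons _ _ _ _ (by simp [List.isPrefixOf])]
  rw [noMatchCons _ _ _ _ (by simp [List.isPrefixOf])]
  rw [noMatchCons _ _ _ _ (by simp [List.isPrefixOf])]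
  rw [noMatchCons _ _ _ _ (by simp [List.isPrefixOf])]
  rw [noMatchCons _ _ _ _ (by simp [List.isPrefixOf])]
  rw [noMatchCons _ _ _ _ (by simp [List.isPrefixOf])]
  rw [noMatchCons _ _ _ _ (by simp [List.isPrefixOf])]
  rw [noMatchCons _ _ _ _ (by simpa [List.isPrefixOf] using hr)]
  rfl

theorem repl2_ca (Y : List Char) :
    replGen ".cross_attn.".toList ".attn2.".toList (".cross_attn.".toList ++ Y)
      = ".attn2.".toList ++ replGen ".cross_attn.".toList ".attn2.".toList Y := by
  show replGen _ _ ('.'::'c'::'r'::'o'::'s'::'s'::'_'::'a'::'t'::'t'::'n'::'.'::Y) = _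
  rw [replGen, if_pos (by simp [List.isPrefixOf])]
  rw [show (".cross_attn.".toList.length - 1) = 11 from by decide]
  rfl

set_option maxRecDepth 8000 in
theorem main_scan : ∀ (n : Nat) (l : List Char), l.length ≤ n →
    ¬ (".self_attn.cross_attn.".toList <:+: l) →
    ¬ (".cross_attn.self_attn.".toList <:+: l) →
    replGen (".cross_attn.".toList) (".attn2.".toList)
      (replGen (".self_attn.".toList) (".attn1.".toList) l) = nscanL l := by
  intro n
  induction n with
  | zero =>
    intro l h _ _
    have hl : l = [] := by cases l <;> simp_all
    subst hl
    rw [replGen, replGen, nscanL]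
  | succ n ih =>
    intro l h hsx hcx
    cases l with
    | nil => rw [replGen, replGen, nscanL]
    | cons c t =>
      by_cases hs : (".self_attn.".toList).isPrefixOf (c :: t) = true
      · -- case A: ".self_attn." matches at the front
        obtain ⟨r, hr⟩ := List.isPrefixOf_iff_prefix.mp hs
        have hdrop : t.drop 10 = r := by
          have h11 : (c :: t).drop 11 = r := by rw [← hr]; rfl
          simpa using h11
        have hrlen : r.length ≤ n := by
          have := congrArg List.length hr; simp at this; simp at h; omega
        have hrsuf : r <:+ (c :: t) := ⟨".self_attn.".toList, hr⟩
        have hnoc : ¬ ("cross_attn.".toList).isPrefixOf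
            (replGen ".self_attn.".toList ".attn1.".toList r) = true := by
          intro hcp
          have hcp' : ("cross_attn".toList ++ ['.']).isPrefixOf
              (replGen ".self_attn.".toList ".attn1.".toList r) = true := by
            rw [show "cross_attn".toList ++ ['.'] = "cross_attn.".toList from by decide]
            exact hcp
          obtain ⟨t', ht', hcase⟩ := scan_letters "cross_attn".toList (by rw [show "cross_attn".toList = ['c','r','o','s','s','_','a','t','t','n'] from by decide]; simp) r hcp'
          apply hsx
          apply List.IsPrefix.isInfix
          rcases hcase with hhead | hsa
          · cases t' with
            | nil => simp at hhead
            | cons d u =>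
              have hd : d = '.' := by simpa using hhead
              refine ⟨u, ?_⟩
              rw [show ".self_attn.cross_attn.".toList
                    = ".self_attn.".toList ++ "cross_attn".toList ++ ['.'] from by decide]
              rw [← hr, ht', hd]; simp
          · obtain ⟨u, hu⟩ := List.isPrefixOf_iff_prefix.mp hsa
            refine ⟨"self_attn.".toList ++ u, ?_⟩
            rw [show ".self_attn.cross_attn.".toList
                  = ".self_attn.".toList ++ "cross_attn".toList ++ ['.'] from by decide]
            rw [← hr, ht', ← hu]
            rw [show (".self_attn.".toList : List Char)
                  = '.' :: "self_attn.".toList from by decide]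
            simp
        rw [replGen]
        simp only [hs, if_pos]
        rw [show (".self_attn.".toList.length - 1) = 10 from by decide]
        rw [hdrop, repl2_a1 _ hnoc,
            ih r hrlen (fun hh => hsx (hh.trans hrsuf.isInfix))
              (fun hh => hcx (hh.trans hrsuf.isInfix))]
        rw [nscanL]
        simp only [hs, if_pos, hdrop]
      · by_cases hc : (".cross_attn.".toList).isPrefixOf (c :: t) = true
        · -- case B: ".cross_attn." matches at the front
          obtain ⟨r, hr⟩ := List.isPrefixOf_iff_prefix.mp hc
          have hdrop : t.drop 11 = r := by
            have h12 : (c :: t).drop 12 = r := by rw [← hr]; rfl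
            simpa using h12
          have hrlen : r.length ≤ n := by
            have := congrArg List.length hr; simp at this; simp at h; omega
          have hrsuf : r <:+ (c :: t) := ⟨".cross_attn.".toList, hr⟩
          have hnosp : ¬ ("self_attn.".toList).isPrefixOf r = true := by
            intro hsp
            obtain ⟨u, hu⟩ := List.isPrefixOf_iff_prefix.mp hsp
            apply hcx
            apply List.IsPrefix.isInfix
            refine ⟨u, ?_⟩
            rw [show ".cross_attn.self_attn.".toList
                  = ".cross_attn.".toList ++ "self_attn.".toList from by decide]
            rw [← hr, ← hu]; simp
          rw [← hr, repl1_ca r hnosp, repl2_ca,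
              ih r hrlen (fun hh => hsx (hh.trans hrsuf.isInfix))
                (fun hh => hcx (hh.trans hrsuf.isInfix))]
          have : nscanL (c :: t) = ".attn2.".toList ++ nscanL r := by
            rw [nscanL]
            simp only [hs, Bool.false_eq_true, if_false, hc, if_pos, hdrop]
          rw [← hr] at this
          rw [this]
        · -- case C: neither matches at the front
          rw [noMatchCons _ _ _ _ hs]
          have hY : ¬ (".cross_attn.".toList).isPrefixOf
              (c :: replGen ".self_attn.".toList ".attn1.".toList t) = true := by
            intro hp
            rw [show (".cross_attn.".toList : List Char)
                  = '.' :: "cross_attn.".toList from by decide] at hp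
            simp only [List.isPrefixOf, Bool.and_eq_true, beq_iff_eq] at hp
            obtain ⟨hcdot, hp2⟩ := hp
            have hp2' : ("cross_attn".toList ++ ['.']).isPrefixOf
                (replGen ".self_attn.".toList ".attn1.".toList t) = true := by
              rw [show "cross_attn".toList ++ ['.'] = "cross_attn.".toList from by decide]
              exact hp2
            obtain ⟨t', ht', hcase⟩ := scan_letters "cross_attn".toList (by rw [show "cross_attn".toList = ['c','r','o','s','s','_','a','t','t','n'] from by decide]; simp) t hp2'
            rcases hcase with hhead | hsa
            · cases t' with
              | nil => simp at hhead
              | cons d u =>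
                have hd : d = '.' := by simpa using hhead
                apply hc
                apply List.isPrefixOf_iff_prefix.mpr
                refine ⟨u, ?_⟩
                rw [show (".cross_attn.".toList : List Char)
                      = '.' :: ("cross_attn".toList ++ ['.']) from by decide]
                rw [← hcdot, ht', hd]; simp
            · obtain ⟨u, hu⟩ := List.isPrefixOf_iff_prefix.mp hsa
              apply hcx
              apply List.IsPrefix.isInfix
              refine ⟨u, ?_⟩
              rw [show ".cross_attn.self_attn.".toList
                    = '.' :: ("cross_attn".toList ++ ".self_attn.".toList) from by decide]
              rw [← hcdot, ht', ← hu]; simp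
          rw [noMatchCons _ _ _ _ hY]
          have htsuf : t <:+ (c :: t) := List.suffix_cons c t
          rw [ih t (by simp at h; omega) (fun hh => hsx (hh.trans htsuf.isInfix))
              (fun hh => hcx (hh.trans htsuf.isInfix))]
          rw [nscanL]
          simp only [hs, hc, Bool.false_eq_true, if_false]

theorem replace_id (s : String) (p : String) (hp : p.toList ≠ []) :
    PySem.Str.replace s p p = String.ofList s.toList := by
  rw [PySem.Str.replace, replace_eq_replGen _ _ _ hp, replGen_id _ hp]

set_option maxRecDepth 8000 in
theorem final_eq (name : String)
    (h1 : PySem.Str.isIn ".self_attn.cross_attn." name = false)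
    (h2 : PySem.Str.isIn ".cross_attn.self_attn." name = false) :
    normalize_parameter_name_py name = String.ofList (nscanL name.toList) := by
  have hsx : ¬ (".self_attn.cross_attn.".toList <:+: name.toList) := by
    intro hinf
    have := (PySem.Str.isIn_iff_infix ".self_attn.cross_attn." name).mpr hinf
    rw [h1] at this; exact Bool.false_ne_true this
  have hcx : ¬ (".cross_attn.self_attn.".toList <:+: name.toList) := by
    intro hinf
    have := (PySem.Str.isIn_iff_infix ".cross_attn.self_attn." name).mpr hinf
    rw [h2] at this; exact Bool.false_ne_true this
  show normalize_parameter_name_py name = _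
  rw [normalize_parameter_name_py]
  rw [replace_id _ ".to_qkv." (by simp)]
  rw [replace_id _ ".to_kv." (by simp)]
  rw [replace_id _ ".to_q." (by simp)]
  rw [replace_id _ ".to_out.0." (by simp)]
  simp only [String.toList_ofList]
  rw [PySem.Str.replace, replace_eq_replGen _ _ _ (by simp), String.toList_ofList,
      PySem.Str.replace, replace_eq_replGen _ _ _ (by simp), String.toList_ofList]
  simp only [String.toList_ofList]
  rw [show (['.','c','r','o','s','s','_','a','t','t','n','.'] : List Char)
        = ".cross_attn.".toList from by decide,
      show (['.','a','t','t','n','2','.'] : List Char) = ".attn2.".toList from by decide]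
  exact congrArg String.ofList
    (main_scan name.toList.length name.toList le_rfl hsx hcx)

-- ===== VERDICT (by name: the statement is the Claim_ definition above) =====
theorem normalize_parameter_name_py_spec : Claim_equal_normalize_parameter_name_py := by
  intro name _ hpre
  unfold Spec_normalize_parameter_name_py
  exact final_eq name hpre.1 hpre.2
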